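-- pv_equiv track=rewrite | github.com/JustinCalma/CECS-174-Homework-2 | JustinCalma_Homework2.py | check_word_square
-- ===== SOURCE A (Python) =====
-- import math
--
-- def check_word_square(square):
--     p = 0
--     m = 0
--     i = 0
--     n = int(math.sqrt(len(square)))
--     while i < (n * n):
--         word = square[i:n+i]
--         for j in range(n):
--             letter1 = word[j]
--             letter2 = square[(j * n) + p]
--             if letter1 != letter2:
--                 return False
--
--         m = m + 1 #Go to next word in word square
--         i = m * n #Change starting index to new word
--         p = p + 1 #Change letters
--
--     return True
-- ===== SOURCE B (Python) =====
-- import math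
--
-- def check_word_square(square):
--     n = int(math.sqrt(len(square)))
--     rows = [square[i*n:i*n+n] for i in range(n)]
--     cols = [[row[j] for row in rows] for j in range(n)]
--     return rows == cols
-- ===== Notes on version B (the rewrite author's own statement) =====
-- stated objective: simpler
-- what changed: B rebuilds the n-by-n grid from the flat list and compares the list of rows with its transpose (built by comprehension), replacing A's manual while-loop over three index counters with early return.
import Mathlib
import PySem

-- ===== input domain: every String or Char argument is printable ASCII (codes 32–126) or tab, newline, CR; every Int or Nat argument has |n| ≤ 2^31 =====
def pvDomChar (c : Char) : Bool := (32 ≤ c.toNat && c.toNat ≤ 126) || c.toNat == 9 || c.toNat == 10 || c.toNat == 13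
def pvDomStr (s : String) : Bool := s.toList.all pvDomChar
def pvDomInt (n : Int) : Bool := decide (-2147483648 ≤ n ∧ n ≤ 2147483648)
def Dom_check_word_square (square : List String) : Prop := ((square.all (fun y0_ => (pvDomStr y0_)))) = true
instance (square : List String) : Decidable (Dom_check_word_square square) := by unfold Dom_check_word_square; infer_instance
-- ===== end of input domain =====

-- B compares the reconstructed grid of rows with its transpose (built by comprehension)
-- instead of A's triple-counter while-loop; return value only, no side effects.
-- int(math.sqrt(len(square))) is ported as Nat.sqrt (exact on the admitted inputs).

-- ===== PORT A =====
-- inner 'for j in range(n)' with early 'return False'; both indexings are in range whenever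
-- n*n ≤ len square (always true for n = sqrt(len)), so .getD "" is exact here.
def checkRowA (square word : List String) (n p : Nat) : Bool :=
  (List.range n).all (fun (j : Nat) =>
    (PySem.List.pyGet? word (j : Int)).getD "" ==
    (PySem.List.pyGet? square ((j * n + p : Nat) : Int)).getD "")

-- the while loop; it runs at most n times, fuel n+1 is sufficient, fuel 0 is unreachable.
def loopA (square : List String) (n : Nat) : Nat → Nat → Nat → Nat → Bool
  | 0, _, _, _ => true
  | fuel + 1, p, m, i =>
    if i < n * n then
      let word := PySem.List.slice square (some (i : Int)) (some ((n + i : Nat) : Int))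
      if checkRowA square word n p then
        loopA square n fuel (p + 1) (m + 1) ((m + 1) * n)
      else false
    else true

def check_word_square (square : List String) : Bool :=
  let n := Nat.sqrt square.length
  loopA square n (n + 1) 0 0 0

-- ===== PORT B =====
def check_word_square_alt (square : List String) : Bool :=
  let n := Nat.sqrt square.length
  let rows := (List.range n).map (fun (i : Nat) =>
    PySem.List.slice square (some ((i * n : Nat) : Int)) (some ((i * n + n : Nat) : Int)))
  let cols := (List.range n).map (fun (j : Nat) =>
    rows.map (fun row => (PySem.List.pyGet? row (j : Int)).getD ""))
  rows == cols

-- ===== PRECONDITION & SPEC =====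
def Spec_check_word_square (square : List String) (out : Bool) : Prop := out = check_word_square_alt square
instance (square : List String) (out : Bool) : Decidable (Spec_check_word_square square out) := by unfold Spec_check_word_square; infer_instance

-- ===== CLAIM (what is proved, stated in full; the proofs are below) =====
def Claim_equal_check_word_square : Prop := ∀ (square : List String), Dom_check_word_square square → Spec_check_word_square square (check_word_square square)

-- ===== LEMMAS AND PROOFS =====

theorem all_congr_mem {α : Type} (l : List α) (p q : α → Bool)
    (h : ∀ a ∈ l, p a = q a) : l.all p = l.all q := by
  induction l with
  | nil => rfl
  | cons x xs ih =>
    simp only [List.all_cons]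
    rw [h x (List.mem_cons_self), ih (fun a ha => h a (List.mem_cons_of_mem _ ha))]

theorem sqrtSq_le (square : List String) :
    Nat.sqrt square.length * Nat.sqrt square.length ≤ square.length := by
  have := Nat.sqrt_le' square.length
  simpa [Nat.pow_two] using this

-- a slice with in-range natural bounds, as a map over range
theorem slice_eq_map_range (square : List String) (a n : Nat) (h : a + n ≤ square.length) :
    PySem.List.slice square (some (a : Int)) (some ((a + n : Nat) : Int)) =
      (List.range n).map (fun j => square.getD (a + j) "") := by
  have : PySem.List.slice square (some (a : Int)) (some ((a + n : Nat) : Int)) =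
      (square.drop a).take n := by
    push_cast
    rw [PySem.List.slice_natCast_add]
  rw [this]
  apply List.ext_getElem
  · simp; omega
  · intro i h1 h2
    simp only [List.getElem_take, List.getElem_drop, List.getElem_map, List.getElem_range]
    rw [List.getD_eq_getElem]

-- indexing a range-comprehension list
theorem getD_map_range_at (square : List String) (f : Nat → Nat) (n j : Nat) (hj : j < n) :
    (PySem.List.pyGet? ((List.range n).map (fun k => square.getD (f k) "")) (j : Int)).getD ""
      = square.getD (f j) "" := by
  rw [PySem.List.pyGet?_natCast, List.getElem?_map]
  simp [hj]

-- the inner row check, in terms of getD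
theorem checkRowA_eq (square : List String) (n m : Nat) (hm : m < n)
    (hlen : n * n ≤ square.length) :
    checkRowA square
      (PySem.List.slice square (some ((m * n : Nat) : Int)) (some ((n + m * n : Nat) : Int))) n m =
    (List.range n).all (fun j => square.getD (m * n + j) "" == square.getD (j * n + m) "") := by
  have hb : m * n + n ≤ square.length := by nlinarith
  have hnm : (n + m * n : Nat) = (m * n + n : Nat) := by omega
  rw [hnm, slice_eq_map_range square (m * n) n hb]
  unfold checkRowA
  apply all_congr_mem
  intro j hj
  simp only [List.mem_range] at hj
  rw [getD_map_range_at square (fun j => m * n + j) n j hj]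
  have hjs : (PySem.List.pyGet? square ((j * n + m : Nat) : Int)).getD ""
      = square.getD (j * n + m) "" := by
    rw [PySem.List.pyGet?_natCast]
    simp [List.getD]
  rw [hjs]

-- the while loop computes 'all rows from m on agree with their columns'
theorem loopA_eq (square : List String) (n : Nat) (hlen : n * n ≤ square.length) :
    ∀ fuel m, n ≤ fuel + m →
      loopA square n fuel m m (m * n) =
        (List.range' m (n - m)).all
          (fun m' => (List.range n).all
            (fun j => square.getD (m' * n + j) "" == square.getD (j * n + m') "")) := by
  intro fuel
  induction fuel with
  | zero =>
    intro m hm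
    have : n - m = 0 := by omega
    simp [loopA, this]
  | succ fuel ih =>
    intro m hm
    by_cases hmn : m < n
    · have hcond : m * n < n * n := by
        have hn : 0 < n := by omega
        exact (Nat.mul_lt_mul_right hn).mpr hmn
      have hrange : List.range' m (n - m) = m :: List.range' (m + 1) (n - (m + 1)) := by
        have h1 : n - m = (n - (m + 1)) + 1 := by omega
        rw [h1, List.range'_succ]
      rw [hrange]
      simp only [loopA, hcond, if_true, List.all_cons]
      rw [checkRowA_eq square n m hmn hlen]
      by_cases hrow :
          (List.range n).all (fun j => square.getD (m * n + j) "" == square.getD (j * n + m) "") = true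
      · rw [hrow]
        simp only [if_true, Bool.true_and]
        exact ih (m + 1) (by omega)
      · simp only [Bool.not_eq_true] at hrow
        rw [hrow]
        simp
    · have hcond : ¬ (m * n < n * n) := by
        have : n * n ≤ m * n := Nat.mul_le_mul_right n (by omega)
        omega
      have : n - m = 0 := by omega
      simp [loopA, hcond, this]

-- B's rows-vs-transpose comparison, reduced to the same pointwise condition
theorem alt_eq (square : List String) :
    check_word_square_alt square =
      (List.range (Nat.sqrt square.length)).all
        (fun m => (List.range (Nat.sqrt square.length)).all
          (fun j => square.getD (m * (Nat.sqrt square.length) + j) "" ==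
                    square.getD (j * (Nat.sqrt square.length) + m) "")) := by
  unfold check_word_square_alt
  set n := Nat.sqrt square.length with hn
  have hlen : n * n ≤ square.length := sqrtSq_le square
  simp only
  have hrows : (List.range n).map (fun (i : Nat) =>
      PySem.List.slice square (some ((i * n : Nat) : Int)) (some ((i * n + n : Nat) : Int))) =
      (List.range n).map (fun i => (List.range n).map (fun j => square.getD (i * n + j) "")) := by
    apply List.map_congr_left
    intro i hi
    simp only [List.mem_range] at hi
    exact slice_eq_map_range square (i * n) n (by nlinarith)
  rw [hrows]
  have hcols : (List.range n).map (fun (j : Nat) =>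
      ((List.range n).map (fun i => (List.range n).map (fun k => square.getD (i * n + k) ""))).map
        (fun row => (PySem.List.pyGet? row (j : Int)).getD "")) =
      (List.range n).map (fun j => (List.range n).map (fun i => square.getD (i * n + j) "")) := by
    apply List.map_congr_left
    intro j hj
    simp only [List.mem_range] at hj
    rw [List.map_map]
    apply List.map_congr_left
    intro i _
    exact getD_map_range_at square (fun k => i * n + k) n j hj
  rw [hcols]
  rw [Bool.eq_iff_iff, beq_iff_eq, List.all_eq_true]
  constructor
  · intro heq m hmmem
    rw [List.all_eq_true]
    intro j hjmem
    simp only [List.mem_range] at hmmem hjmem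
    have h1 := congrArg (fun l => l[m]?) heq
    simp only [List.getElem?_map, List.getElem?_range, hmmem, Option.map_some] at h1
    have h2 := congrArg (fun l => l[j]?) (Option.some.inj h1)
    simp only [List.getElem?_map, List.getElem?_range, hjmem, Option.map_some] at h2
    rw [beq_iff_eq]
    exact Option.some.inj h2
  · intro hall
    apply List.ext_getElem
    · simp
    · intro i h1 h2
      simp only [List.length_map, List.length_range] at h1
      simp only [List.getElem_map, List.getElem_range]
      apply List.ext_getElem
      · simp
      · intro j h3 h4
        simp only [List.length_map, List.length_range] at h3
        simp only [List.getElem_map, List.getElem_range]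
        have := hall i (List.mem_range.mpr h1)
        rw [List.all_eq_true] at this
        have := this j (List.mem_range.mpr h3)
        simpa [beq_iff_eq] using this

-- ===== VERDICT (by name: the statement is the Claim_ definition above) =====
theorem check_word_square_spec : Claim_equal_check_word_square := by
  intro square _
  unfold Spec_check_word_square check_word_square
  set n := Nat.sqrt square.length with hn
  have hlen : n * n ≤ square.length := sqrtSq_le square
  have hloop := loopA_eq square n hlen (n + 1) 0 (by omega)
  simp only [Nat.zero_mul, Nat.sub_zero] at hloop
  rw [hloop, alt_eq square, ← hn, List.range_eq_range']
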